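-- pv_equiv track=rewrite | github.com/roidaradal/aoc-py | 2015/1519.py | breakdown
-- ===== SOURCE A (Python) =====
-- def breakdown(chemical: str) -> set[str]:
--     elements: set[str] = set()
--     curr = [chemical[0]]
--     for nxt in chemical[1:]:
--         if nxt.isupper():
--             elements.add(''.join(curr))
--             curr = [nxt]
--         else:
--             curr.append(nxt)
--     elements.add(''.join(curr))
--     return elements
-- ===== SOURCE B (Python) =====
-- def breakdown(chemical: str) -> set[str]:
--     n = len(chemical)
--     bounds = [0] + [i for i in range(1, n) if chemical[i].isupper()] + [n]
--     elements: set[str] = set()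
--     for a, b in zip(bounds, bounds[1:]):
--         elements.add(chemical[a:b])
--     return elements
-- ===== Notes on version B (the rewrite author's own statement) =====
-- stated objective: alternative
-- what changed: B first collects all element-boundary indices (0, every uppercase position, len) in one scan and then slices the string between consecutive boundaries, instead of growing a character buffer inside the loop.
import Mathlib
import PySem

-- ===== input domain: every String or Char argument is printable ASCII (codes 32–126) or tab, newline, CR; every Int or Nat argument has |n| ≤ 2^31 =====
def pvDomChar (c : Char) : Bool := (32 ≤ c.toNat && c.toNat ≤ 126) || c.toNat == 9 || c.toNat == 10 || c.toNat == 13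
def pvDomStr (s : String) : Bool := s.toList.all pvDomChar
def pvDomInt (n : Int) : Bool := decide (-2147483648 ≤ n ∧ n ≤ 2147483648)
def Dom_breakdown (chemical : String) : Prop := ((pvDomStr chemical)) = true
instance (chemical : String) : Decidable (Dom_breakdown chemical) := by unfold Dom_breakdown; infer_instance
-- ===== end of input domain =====

-- B collects the element-boundary indices first and slices between consecutive boundaries,
-- instead of growing a character buffer while scanning (alternative decomposition, same cost).


-- ===== PORT A =====
def breakdown (chemical : String) : List String :=
  match PySem.Str.pyGet? chemical 0 with
  | none => []  -- chemical[0] raises IndexError on the empty string; excluded by Pre_breakdown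
  | some c0 =>
    let st := (PySem.Chars.slice chemical.toList (some 1) none).foldl
      (fun (st : PySem.Set String × List Char) nxt =>
        if PySem.Chars.isupper nxt then (PySem.Set.add st.1 (String.mk st.2), [nxt])
        else (st.1, st.2 ++ [nxt]))
      (PySem.Set.empty, [c0])
    PySem.Set.add st.1 (String.mk st.2)

-- ===== PORT B =====
def breakdown_alt (chemical : String) : List String :=
  let l := chemical.toList
  let n : Int := (l.length : Int)
  let bounds : List Int :=
    0 :: ((PySem.List.pyRange 1 n 1).filter
            (fun i => PySem.Chars.isupper (PySem.List.pyGetD l i ' ')) ++ [n])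
  (bounds.zip bounds.tail).foldl
    (fun s ab => PySem.Set.add s (String.mk (PySem.Chars.slice l (some ab.1) (some ab.2))))
    PySem.Set.empty

-- ===== PRECONDITION & SPEC =====
-- Pre_ excludes exactly the empty string, on which A raises IndexError at chemical[0].
def Pre_breakdown (chemical : String) : Prop := chemical ≠ ""
instance (chemical : String) : Decidable (Pre_breakdown chemical) := by unfold Pre_breakdown; infer_instance
def pvWitness_breakdown : String := "NaOHxyZ"
def Spec_breakdown (chemical : String) (out : List String) : Prop := out = breakdown_alt chemical
instance (chemical : String) (out : List String) : Decidable (Spec_breakdown chemical out) := by unfold Spec_breakdown; infer_instance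

-- ===== CLAIM (what is proved, stated in full; the proofs are below) =====
def Claim_equal_breakdown : Prop := ∀ (chemical : String), Dom_breakdown chemical → Pre_breakdown chemical → Spec_breakdown chemical (breakdown chemical)

-- ===== LEMMAS AND PROOFS =====

-- the list of element segments of the chemical, the common specification of both ports
def segsAux (curr : List Char) : List Char → List (List Char)
  | [] => [curr]
  | x :: xs => if PySem.Chars.isupper x then curr :: segsAux [x] xs else segsAux (curr ++ [x]) xs

-- A's fold realises segsAux
lemma foldA (rest : List Char) : ∀ (curr : List Char) (s : PySem.Set String),
    (PySem.Set.add
      (rest.foldl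
        (fun (st : PySem.Set String × List Char) nxt =>
          if PySem.Chars.isupper nxt then (PySem.Set.add st.1 (String.mk st.2), [nxt])
          else (st.1, st.2 ++ [nxt])) (s, curr)).1
      (String.mk (rest.foldl
        (fun (st : PySem.Set String × List Char) nxt =>
          if PySem.Chars.isupper nxt then (PySem.Set.add st.1 (String.mk st.2), [nxt])
          else (st.1, st.2 ++ [nxt])) (s, curr)).2))
    = ((segsAux curr rest).map String.mk).foldl PySem.Set.add s := by
  induction rest with
  | nil => intro curr s; simp [segsAux]
  | cons x xs ih =>
    intro curr s
    by_cases h : PySem.Chars.isupper x = true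
    · simp only [List.foldl_cons, segsAux, h, if_true, List.map_cons, List.foldl_cons]
      exact ih [x] (PySem.Set.add s (String.mk curr))
    · simp only [List.foldl_cons, segsAux, h, if_false, Bool.false_eq_true]
      exact ih (curr ++ [x]) s

-- the uppercase positions of l at index ≥ s (exactly B's filtered range)
def upsFrom (l : List Char) (s : Int) : List Int :=
  (PySem.List.pyRange s (l.length : Int) 1).filter
    (fun i => PySem.Chars.isupper (PySem.List.pyGetD l i ' '))

-- B's consecutive-boundary slices realise segsAux
lemma sliceSegs (k : Nat) : ∀ (l : List Char) (s a : Int), 0 ≤ s → s ≤ a → a < (l.length : Int) →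
    ((l.length : Int) - (a + 1)).toNat = k →
    ((s :: (upsFrom l (a+1) ++ [(l.length : Int)])).zip (upsFrom l (a+1) ++ [(l.length : Int)])).map
        (fun p => (l.drop p.1.toNat).take (p.2.toNat - p.1.toNat))
      = segsAux ((l.drop s.toNat).take ((a+1).toNat - s.toNat)) (l.drop (a+1).toNat) := by
  induction k with
  | zero =>
    intro l s a hs hsa ha hk
    have hlen : (l.length : Int) ≤ a + 1 := by omega
    have hups : upsFrom l (a+1) = [] := by
      unfold upsFrom; rw [PySem.List.pyRange_one_eq_nil hlen]; rfl
    have hdrop : l.drop (a+1).toNat = [] := List.drop_eq_nil_of_le (by omega)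
    rw [hups, hdrop]
    simp only [List.nil_append, List.zip_cons_cons, List.zip_nil_right,
      List.map_cons, List.map_nil, segsAux]
    have e1 : (l.drop s.toNat).take (((l.length : Int)).toNat - s.toNat) = l.drop s.toNat :=
      List.take_of_length_le (by simp only [List.length_drop]; omega)
    have e2 : (l.drop s.toNat).take ((a+1).toNat - s.toNat) = l.drop s.toNat :=
      List.take_of_length_le (by simp only [List.length_drop]; omega)
    rw [e1, e2]
  | succ k ih =>
    intro l s a hs hsa ha hk
    have ha1 : a + 1 < (l.length : Int) := by omega
    have hidx : (a+1).toNat < l.length := by omega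
    have hdrop : l.drop (a+1).toNat = l[(a+1).toNat] :: l.drop ((a+1+1).toNat) := by
      rw [show (a+1+1).toNat = (a+1).toNat + 1 from by omega]
      exact List.drop_eq_getElem_cons hidx
    have hups : upsFrom l (a+1) =
        (if PySem.Chars.isupper l[(a+1).toNat] then [a+1] else []) ++ upsFrom l (a+1+1) := by
      unfold upsFrom
      rw [PySem.List.pyRange_one_cons ha1, List.filter_cons,
          PySem.List.pyGetD_eq_getElem (i := a+1) l ' ' (by omega) ha1]
      split_ifs with h <;> simp
    have hk2 : ((l.length : Int) - (a+1+1)).toNat = k := by omega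
    rw [hdrop, hups]
    by_cases h : PySem.Chars.isupper l[(a+1).toNat] = true
    · simp only [h, if_true, List.nil_append, List.cons_append,
        List.zip_cons_cons, List.map_cons, segsAux]
      have hih := ih l (a+1) (a+1) (by omega) le_rfl ha1 hk2
      rw [hih]
      have htake : (l.drop (a+1).toNat).take ((a+1+1).toNat - (a+1).toNat) = [l[(a+1).toNat]] := by
        rw [show (a+1+1).toNat - (a+1).toNat = 1 by omega, hdrop]; rfl
      rw [htake]
    · simp only [h, if_false, Bool.false_eq_true, List.nil_append, segsAux]
      have hih := ih l s (a+1) hs (by omega) ha1 hk2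
      rw [hih]
      congr 1
      rw [show (a+1+1).toNat - s.toNat = ((a+1).toNat - s.toNat) + 1 by omega, List.take_succ]
      congr 1
      rw [List.getElem?_drop, show s.toNat + ((a+1).toNat - s.toNat) = (a+1).toNat by omega,
          List.getElem?_eq_getElem hidx]
      rfl

-- every boundary is a nonnegative index
lemma bounds_nonneg (l : List Char) (x : Int)
    (hx : x ∈ (0 : Int) :: (upsFrom l 1 ++ [(l.length : Int)])) : 0 ≤ x := by
  rcases List.mem_cons.mp hx with h | h
  · omega
  · rcases List.mem_append.mp h with h | h
    · have := List.of_mem_filter h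
      have hm := List.mem_of_mem_filter h
      have := (PySem.List.mem_pyRange_one).mp hm
      omega
    · simp at h; omega

-- ===== VERDICT (by name: the statement is the Claim_ definition above) =====
theorem breakdown_spec : Claim_equal_breakdown := by
  intro chemical _ hpre
  unfold Spec_breakdown
  have hl : chemical.toList ≠ [] := fun h => hpre (String.toList_eq_nil_iff.mp h)
  set l := chemical.toList with hldef
  have hlen : 0 < l.length := List.length_pos_iff.mpr hl
  -- A side
  have hget0 : PySem.Str.pyGet? chemical 0 = some l[0] := by
    simp [PySem.Str.pyGet?_eq, PySem.Chars.pyGet?_eq_listPyGet?, ← hldef]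
    rw [show (0 : Int) = ((0 : Nat) : Int) by rfl, PySem.List.pyGet?_natCast]
    exact List.getElem?_eq_getElem hlen
  have hA : breakdown chemical
      = ((segsAux [l[0]] l.tail).map String.mk).foldl PySem.Set.add PySem.Set.empty := by
    unfold breakdown
    rw [hget0]
    simp only
    rw [show PySem.Chars.slice chemical.toList (some 1) none = l.tail by
      rw [← hldef, PySem.Chars.slice_eq_listSlice, PySem.List.slice_from_one]]
    exact foldA l.tail [l[0]] PySem.Set.empty
  -- B side
  have hB : breakdown_alt chemical
      = ((((0 : Int) :: (upsFrom l 1 ++ [(l.length : Int)])).zip (upsFrom l 1 ++ [(l.length : Int)])).map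
          (fun p => String.mk (PySem.Chars.slice l (some p.1) (some p.2)))).foldl
          PySem.Set.add PySem.Set.empty := by
    unfold breakdown_alt upsFrom
    rw [List.foldl_map]
    rfl
  rw [hA, hB]
  -- turn B's slices into drop/take form
  have hmap : (((0 : Int) :: (upsFrom l 1 ++ [(l.length : Int)])).zip (upsFrom l 1 ++ [(l.length : Int)])).map
        (fun p => String.mk (PySem.Chars.slice l (some p.1) (some p.2)))
      = ((((0 : Int) :: (upsFrom l 1 ++ [(l.length : Int)])).zip (upsFrom l 1 ++ [(l.length : Int)])).map
          (fun p => (l.drop p.1.toNat).take (p.2.toNat - p.1.toNat))).map String.mk := by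
    rw [List.map_map]
    apply List.map_congr_left
    intro p hp
    obtain ⟨hp1, hp2⟩ := List.of_mem_zip hp
    have h1 : 0 ≤ p.1 := bounds_nonneg l p.1 hp1
    have h2 : 0 ≤ p.2 := bounds_nonneg l p.2 (List.mem_cons_of_mem 0 hp2)
    simp only [Function.comp_apply]
    rw [PySem.Chars.slice_eq_listSlice, PySem.List.slice_toNat l h1 h2]
  rw [hmap]
  have hseg := sliceSegs ((l.length : Int) - 1).toNat l 0 0 le_rfl le_rfl (by exact_mod_cast hlen) (by omega)
  have hz : (0 : Int) + 1 = 1 := by ring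
  rw [hz] at hseg
  rw [hseg]
  obtain ⟨c, t, hct⟩ := List.exists_cons_of_ne_nil hl
  simp [hct]
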